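-- pv_equiv track=rewrite | github.com/zhouying20/ai-text-detector-evaluation | attack/transformation/char/punctuation_append.py | _get_punctuation_scope
-- ===== SOURCE A (Python) =====
-- import string
--
-- def _get_punctuation_scope(tokens):
--     r"""
--     Get indices of punctuations at the end of tokens
--
--     :param list tokens: word list
--     :return list indices: indices list
--
--     """
--     indices = []
--     for i in range(len(tokens) - 1, -1, -1):
--         if tokens[i] in string.punctuation:
--             indices.append(i)
--         else:
--             break
--
--     indices.reverse()
--
--     return indices
-- ===== SOURCE B (Python) =====
-- import string
--
-- def _get_punctuation_scope(tokens):
--     last = -1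
--     for i, t in enumerate(tokens):
--         if t not in string.punctuation:
--             last = i
--     return list(range(last + 1, len(tokens)))
-- ===== Notes on version B (the rewrite author's own statement) =====
-- stated objective: alternative
-- what changed: Replaces the backward collect-append-then-reverse scan with a single forward pass that tracks the last non-punctuation index and builds the result directly as range(last+1, len(tokens)).
import Mathlib
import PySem

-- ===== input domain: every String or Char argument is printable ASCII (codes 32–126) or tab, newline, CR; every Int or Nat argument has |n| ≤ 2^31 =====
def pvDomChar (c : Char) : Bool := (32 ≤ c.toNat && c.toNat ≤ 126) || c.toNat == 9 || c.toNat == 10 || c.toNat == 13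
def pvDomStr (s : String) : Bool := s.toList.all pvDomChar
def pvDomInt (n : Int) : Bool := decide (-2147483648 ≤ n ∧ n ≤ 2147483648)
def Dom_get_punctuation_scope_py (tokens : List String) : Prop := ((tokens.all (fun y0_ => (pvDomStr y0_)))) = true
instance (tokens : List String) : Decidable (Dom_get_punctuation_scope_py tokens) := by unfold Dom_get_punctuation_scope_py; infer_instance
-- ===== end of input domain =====

-- B replaces A's backward collect-append-then-reverse scan by a forward pass tracking the
-- last non-punctuation index and building the result as a range (alternative decomposition).


-- string.punctuation
def pvPunct : String := "!\"#$%&'()*+,-./:;<=>?@[\\]^_`{|}~"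

-- ===== PORT A =====
-- the `for i in range(len(tokens)-1, -1, -1)` loop: append i while tokens[i] in punctuation, break otherwise
def pvALoop (tokens : List String) : List Int → Nat → List Int
  | acc, 0 => acc
  | acc, i + 1 =>
      if PySem.Str.isIn (PySem.List.pyGetD tokens (i : Int) "") pvPunct then
        pvALoop tokens (acc ++ [(i : Int)]) i
      else acc

def get_punctuation_scope_py (tokens : List String) : List Int :=
  (pvALoop tokens [] tokens.length).reverse

-- ===== PORT B =====
def get_punctuation_scope_py_alt (tokens : List String) : List Int :=
  let last := (PySem.List.enumerate tokens 0).foldl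
    (fun last it => if PySem.Str.isIn it.2 pvPunct then last else it.1) (-1)
  PySem.List.pyRange (last + 1) (tokens.length : Int) 1

-- ===== PRECONDITION & SPEC =====
def Spec_get_punctuation_scope_py (tokens : List String) (out : List Int) : Prop := out = get_punctuation_scope_py_alt tokens
instance (tokens : List String) (out : List Int) : Decidable (Spec_get_punctuation_scope_py tokens out) := by unfold Spec_get_punctuation_scope_py; infer_instance

-- ===== CLAIM (what is proved, stated in full; the proofs are below) =====
def Claim_equal_get_punctuation_scope_py : Prop := ∀ (tokens : List String), Dom_get_punctuation_scope_py tokens → Spec_get_punctuation_scope_py tokens (get_punctuation_scope_py tokens)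

-- ===== LEMMAS AND PROOFS =====

-- number of trailing punctuation-like tokens
def pvRun (xs : List String) : Nat :=
  (xs.reverse.takeWhile (fun t => PySem.Str.isIn t pvPunct)).length

theorem pvRun_le (xs : List String) : pvRun xs ≤ xs.length := by
  have := xs.reverse.takeWhile_sublist (p := fun t => PySem.Str.isIn t pvPunct) |>.length_le
  simpa [pvRun] using this

theorem pvRun_concat (ys : List String) (t : String) :
    pvRun (ys ++ [t]) = if PySem.Str.isIn t pvPunct then pvRun ys + 1 else 0 := by
  simp [pvRun, List.takeWhile]
  split <;> simp_all

theorem pvTakeWhile_concat_len {α : Type} (p : α → Bool) (xs : List α) (t : α) :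
    (List.takeWhile p (xs ++ [t])).length =
      if (List.takeWhile p xs).length = xs.length then
        xs.length + (if p t then 1 else 0)
      else (List.takeWhile p xs).length := by
  induction xs with
  | nil => simp [List.takeWhile]; split <;> simp_all
  | cons x xs ih =>
    have hle := (xs.takeWhile_sublist (p := p)).length_le
    by_cases hx : p x
    · simp only [List.cons_append, List.takeWhile_cons, hx, if_true, List.length_cons, ih]
      split_ifs <;> omega
    · simp only [List.cons_append, List.takeWhile_cons, hx, Bool.false_eq_true, if_false,
        List.length_nil, List.length_cons]
      rw [if_neg (by omega)]

theorem pvRun_cons (t : String) (xs : List String) :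
    pvRun (t :: xs) =
      if pvRun xs = xs.length ∧ PySem.Str.isIn t pvPunct then xs.length + 1 else pvRun xs := by
  have h := pvTakeWhile_concat_len (fun s => PySem.Str.isIn s pvPunct) xs.reverse t
  simp only [pvRun, List.reverse_cons]
  rw [h]
  simp only [List.length_reverse]
  split_ifs with h1 h2 h3 h4 <;> simp_all

-- A's loop computes the descending list of trailing punctuation indices below i
theorem pvALoop_eq (tokens : List String) :
    ∀ i, i ≤ tokens.length → ∀ acc,
      pvALoop tokens acc i =
        acc ++ ((List.range' (i - pvRun (tokens.take i)) (pvRun (tokens.take i))).map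
          (fun (k : Nat) => (k : Int))).reverse := by
  intro i
  induction i with
  | zero => intro _ acc; simp [pvALoop, pvRun]
  | succ i ih =>
    intro hle acc
    have hi : i < tokens.length := by omega
    have htake : tokens.take (i + 1) = tokens.take i ++ [tokens[i]] := by
      rw [List.take_add_one]; simp [List.getElem?_eq_getElem hi]
    have hget : PySem.List.pyGetD tokens (i : Int) "" = tokens[i] := by
      rw [PySem.List.pyGetD_natCast]; simp [List.getD, List.getElem?_eq_getElem hi]
    have hrun_le : pvRun (tokens.take i) ≤ i := by
      have := pvRun_le (tokens.take i)
      simpa [List.length_take, Nat.min_eq_left (by omega : i ≤ tokens.length)] using this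
    rw [pvALoop, hget, htake, pvRun_concat]
    by_cases hp : PySem.Str.isIn tokens[i] pvPunct
    · rw [if_pos hp, if_pos hp, ih (by omega) (acc ++ [(i : Int)])]
      have : i + 1 - (pvRun (tokens.take i) + 1) = i - pvRun (tokens.take i) := by omega
      rw [this]
      have hconcat : List.range' (i - pvRun (tokens.take i)) (pvRun (tokens.take i) + 1) =
          List.range' (i - pvRun (tokens.take i)) (pvRun (tokens.take i)) ++ [i] := by
        have := List.range'_concat (step := 1) (s := i - pvRun (tokens.take i))
          (n := pvRun (tokens.take i))
        rw [this]; congr 2; omega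
      rw [hconcat]; simp
    · rw [if_neg hp, if_neg hp]; simp

-- B's fold computes: init if every token is punctuation-like, else s + (index past the last non-punct one)
theorem pvBFold_eq (tokens : List String) :
    ∀ (s init : Int),
      (PySem.List.enumerate tokens s).foldl
        (fun last it => if PySem.Str.isIn it.2 pvPunct then last else it.1) init =
      if pvRun tokens = tokens.length then init
      else s + ((tokens.length - pvRun tokens : Nat) : Int) - 1 := by
  induction tokens with
  | nil => intro s init; simp [PySem.List.enumerate, pvRun]
  | cons t xs ih =>
    intro s init
    rw [PySem.List.enumerate_cons, List.foldl_cons, ih, pvRun_cons]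
    have hle := pvRun_le xs
    by_cases hall : pvRun xs = xs.length
    · by_cases hp : PySem.Str.isIn t pvPunct = true
      · simp only [hall, hp, and_self, if_true, List.length_cons]
      · simp only [Bool.not_eq_true] at hp
        simp only [hall, hp, Bool.false_eq_true, and_false, if_false, if_true,
          List.length_cons]
        rw [if_neg (by omega)]
        have h1 : xs.length + 1 - xs.length = 1 := by omega
        rw [h1]; push_cast; ring
    · rw [if_neg (show ¬(pvRun xs = xs.length ∧ PySem.Str.isIn t pvPunct = true) by tauto)]
      rw [if_neg hall, List.length_cons,
        if_neg (show ¬(pvRun xs = xs.length + 1) by omega)]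
      omega

theorem pvRange_shift (a : Int) (n : Nat) :
    PySem.List.pyRange a (a + (n : Int)) 1 = (List.range n).map (fun (k : Nat) => a + (k : Int)) := by
  induction n generalizing a with
  | zero => simp [PySem.List.pyRange]
  | succ m ih =>
    rw [PySem.List.pyRange_one_cons (by omega)]
    have h1 : a + ((m + 1 : Nat) : Int) = (a + 1) + (m : Nat) := by push_cast; ring
    rw [h1, ih (a + 1), List.range_succ_eq_map, List.map_cons, List.map_map]
    refine List.cons_eq_cons.mpr ⟨by simp, ?_⟩
    apply List.map_congr_left; intro k _
    simp only [Function.comp_apply]; push_cast; ring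

theorem pv_main (tokens : List String) :
    get_punctuation_scope_py tokens = get_punctuation_scope_py_alt tokens := by
  unfold get_punctuation_scope_py get_punctuation_scope_py_alt
  have hA := pvALoop_eq tokens tokens.length (le_refl _) []
  rw [List.take_length] at hA
  rw [hA, pvBFold_eq tokens 0 (-1)]
  have hle := pvRun_le tokens
  set r := pvRun tokens with hr
  set n := tokens.length with hn
  show _ = PySem.List.pyRange
    ((if r = n then (-1 : Int) else 0 + ((n - r : Nat) : Int) - 1) + 1) (n : Int) 1
  have hlast1 : (if r = n then (-1 : Int) else 0 + ((n - r : Nat) : Int) - 1) + 1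
      = ((n - r : Nat) : Int) := by
    split_ifs with h
    · simp [h]
    · ring
  rw [hlast1]
  have hnn : (n : Int) = ((n - r : Nat) : Int) + (r : Int) := by omega
  rw [hnn, pvRange_shift ((n - r : Nat) : Int) r]
  rw [List.range'_eq_map_range, List.map_map]
  simp only [List.nil_append, List.reverse_reverse]
  apply List.map_congr_left; intro k _
  simp only [Function.comp_apply]; omega

-- ===== VERDICT (by name: the statement is the Claim_ definition above) =====
theorem get_punctuation_scope_py_spec : Claim_equal_get_punctuation_scope_py := by
  intro tokens _
  unfold Spec_get_punctuation_scope_py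
  exact pv_main tokens
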